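-- pv_equiv track=rewrite | github.com/tdodson0612/Algorithm-Visualizer | algo_visualizer.py | generate_bfs_steps
-- ===== SOURCE A (Python) =====
-- from collections import deque
--
-- def generate_bfs_steps(arr):
--     steps = []
--     visited = [False] * len(arr)
--     queue = deque()
--     queue.append(0)
--
--     while queue:
--         i = queue.popleft()
--         if i >= len(arr) or visited[i]:
--             continue
--         visited[i] = True
--         steps.append(([i], visited[:]))
--         if i + 1 < len(arr):
--             queue.append(i + 1)
--         if i + 2 < len(arr):
--             queue.append(i + 2)
--
--     return steps
-- ===== SOURCE B (Python) =====
-- def generate_bfs_steps(arr):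
--     n = len(arr)
--     return [([i], [True] * (i + 1) + [False] * (n - i - 1)) for i in range(n)]
-- ===== Notes on version B (the rewrite author's own statement) =====
-- stated objective: simpler
-- what changed: The deque, queue bookkeeping and revisit-skipping are dropped: since the i+1/i+2 linear-graph BFS from 0 visits indices 0..n-1 in order, B emits each step's snapshot directly as a closed-form prefix of Trues, with no visited array or queue maintained at all.
import Mathlib
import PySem

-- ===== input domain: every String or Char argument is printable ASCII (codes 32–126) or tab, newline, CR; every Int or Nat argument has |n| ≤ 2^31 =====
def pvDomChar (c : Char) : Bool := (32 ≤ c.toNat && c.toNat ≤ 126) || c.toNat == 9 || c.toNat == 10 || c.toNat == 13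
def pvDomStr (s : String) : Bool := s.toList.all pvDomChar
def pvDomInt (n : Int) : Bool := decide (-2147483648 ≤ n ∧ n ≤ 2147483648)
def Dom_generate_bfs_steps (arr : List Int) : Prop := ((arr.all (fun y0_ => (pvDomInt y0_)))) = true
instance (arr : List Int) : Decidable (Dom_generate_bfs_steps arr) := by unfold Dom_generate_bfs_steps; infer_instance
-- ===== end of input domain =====

-- B replaces A's deque-based BFS (which on this i+1/i+2 linear graph visits 0..n-1 in order)
-- by directly emitting each snapshot as a closed-form prefix of Trues: simpler, no queue or visited array.

-- ===== PORT A =====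
-- Termination helper for the BFS loop: setting a false cell to true strictly lowers the false-count.
theorem pv_count_false_set (v : List Bool) (i : Nat) (hi : i < v.length)
    (hv : v.getD i false = false) :
    (v.set i true).count false < v.count false := by
  induction v generalizing i with
  | nil => simp at hi
  | cons a t ih =>
    cases i with
    | zero =>
      simp only [List.getD_cons_zero] at hv
      subst hv
      simp
    | succ j =>
      simp only [List.getD_cons_succ] at hv
      have := ih j (by simpa using hi) hv
      simp only [List.set_cons_succ, List.count_cons]
      omega

-- Loop of A. BFS queue holds the nonnegative indices A enqueues (0, i+1, i+2); `len(arr)` is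
-- always `visited.length` in A (visited = [False]*len(arr), never resized), used as the bound here.
def bfsLoop (queue : List Nat) (visited : List Bool) : List (List Int × List Bool) :=
  match queue with
  | [] => []
  | i :: rest =>
    if h : visited.length ≤ i ∨ visited.getD i false = true then
      bfsLoop rest visited
    else
      ([(i : Int)], visited.set i true) ::
        bfsLoop (rest ++ (if i + 1 < visited.length then [i + 1] else [])
                      ++ (if i + 2 < visited.length then [i + 2] else [])) (visited.set i true)
termination_by (visited.count false, queue.length)
decreasing_by
  · exact Prod.Lex.right _ (Nat.lt_succ_self _)
  · simp only [not_or, Bool.not_eq_true, not_le] at h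
    exact Prod.Lex.left _ _ (pv_count_false_set visited i h.1 (by simpa using h.2))

def generate_bfs_steps (arr : List Int) : List (List Int × List Bool) :=
  bfsLoop [0] (List.replicate arr.length false)

-- ===== PORT B =====
def generate_bfs_steps_alt (arr : List Int) : List (List Int × List Bool) :=
  let n := arr.length
  (List.range n).map (fun (i : Nat) => ([(i : Int)], List.replicate (i + 1) true ++ List.replicate (n - i - 1) false))

-- ===== PRECONDITION & SPEC =====
def Spec_generate_bfs_steps (arr : List Int) (out : List (List Int × List Bool)) : Prop := out = generate_bfs_steps_alt arr
instance (arr : List Int) (out : List (List Int × List Bool)) : Decidable (Spec_generate_bfs_steps arr out) := by unfold Spec_generate_bfs_steps; infer_instance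

-- ===== CLAIM (what is proved, stated in full; the proofs are below) =====
def Claim_equal_generate_bfs_steps : Prop := ∀ (arr : List Int), Dom_generate_bfs_steps arr → Spec_generate_bfs_steps arr (generate_bfs_steps arr)

-- ===== LEMMAS AND PROOFS =====

-- visited array after the first k indices have been visited
def mask (k n : Nat) : List Bool := (List.range n).map (fun j => decide (j < k))

-- the steps emitted from index k onwards
def spec (n k : Nat) : List (List Int × List Bool) :=
  if h : k < n then ([(k : Int)], mask (k + 1) n) :: spec n (k + 1) else []
termination_by n - k

theorem mask_length (k n : Nat) : (mask k n).length = n := by simp [mask]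

theorem mask_getElem (k n j : Nat) (hj : j < n) :
    (mask k n)[j]'(by simp [mask_length, hj]) = decide (j < k) := by
  simp [mask]

theorem mask_getD_lt (k n a : Nat) (ha : a < k) (han : a < n) :
    (mask k n).getD a false = true := by
  rw [List.getD_eq_getElem?_getD, List.getElem?_eq_getElem (by simpa [mask_length])]
  simp [mask_getElem k n a han, ha]

theorem mask_getD_self (k n : Nat) (h : k < n) : (mask k n).getD k false = false := by
  rw [List.getD_eq_getElem?_getD, List.getElem?_eq_getElem (by simpa [mask_length])]
  simp [mask_getElem k n k h]

theorem mask_set (k n : Nat) (h : k < n) : (mask k n).set k true = mask (k + 1) n := by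
  apply List.ext_getElem
  · simp [mask_length]
  · intro j h1 h2
    rw [List.getElem_set]
    have hj : j < n := by simpa [mask_length] using h2
    rw [mask_getElem (k + 1) n j hj]
    by_cases hjk : k = j
    · simp [hjk]
    · rw [if_neg hjk, mask_getElem k n j hj]
      have : j < k ↔ j < k + 1 := by omega
      simp [this]

theorem mask_zero (n : Nat) : mask 0 n = List.replicate n false := by
  simp [mask]

-- split helper: a list of elements ≤ c followed by c :: tail splits at a first occurrence of c
theorem split_first (c : Nat) (l : List Nat) (hl : ∀ j ∈ l, j ≤ c) (tail : List Nat) :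
    ∃ q1 q2, l ++ c :: tail = q1 ++ c :: q2 ∧ ∀ j ∈ q1, j < c := by
  induction l with
  | nil => exact ⟨[], tail, rfl, by simp⟩
  | cons a t ih =>
    by_cases hac : a = c
    · exact ⟨[], t ++ c :: tail, by simp [hac], by simp⟩
    · obtain ⟨q1, q2, heq, hq1⟩ := ih (fun j hj => hl j (List.mem_cons_of_mem a hj))
      refine ⟨a :: q1, q2, by simp [heq], ?_⟩
      intro j hj
      rcases List.mem_cons.1 hj with rfl | hj
      · exact lt_of_le_of_ne (hl j (by simp)) hac
      · exact hq1 j hj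

-- Main A-side invariant: from state (queue q, visited = mask k n), the loop emits spec n k.
theorem bfsLoop_inv (n : Nat) : ∀ (fuel : Nat) (k : Nat) (q : List Nat),
    2 * (n - k) + q.length ≤ fuel →
    k ≤ n →
    (∀ j ∈ q, j ≤ k + 1) →
    (k < n → ∃ q1 q2, q = q1 ++ k :: q2 ∧ ∀ j ∈ q1, j < k ∨ n ≤ j) →
    bfsLoop q (mask k n) = spec n k := by
  intro fuel
  induction fuel with
  | zero =>
    intro k q hf hk _ hq
    have hq0 : q = [] := by cases q <;> simp_all
    subst hq0
    have hkn : k = n := by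
      by_contra hne
      obtain ⟨q1, q2, heq, -⟩ := hq (lt_of_le_of_ne hk hne)
      simp at heq
    subst hkn
    rw [bfsLoop, spec]
    simp
  | succ m ih =>
    intro k q hf hk hle hq
    match q with
    | [] =>
      have hkn : k = n := by
        by_contra hne
        obtain ⟨q1, q2, heq, -⟩ := hq (lt_of_le_of_ne hk hne)
        simp at heq
      subst hkn
      rw [bfsLoop, spec]
      simp
    | i :: rest =>
      by_cases hkn : k < n
      · obtain ⟨q1, q2, heq, hq1⟩ := hq hkn
        rcases q1 with _ | ⟨a, q1'⟩
        · -- head of the queue is k itself: visit it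
          simp only [List.nil_append] at heq
          injection heq with h1 h2
          subst h1; subst h2
          rw [bfsLoop, dif_neg (by
            rw [mask_length, mask_getD_self i n hkn]
            intro hc
            rcases hc with hc | hc
            · omega
            · simp at hc)]
          rw [mask_set i n hkn, spec, dif_pos hkn]
          congr 1
          have hl1 : (if i + 1 < (mask i n).length then [i + 1] else []).length ≤ 1 := by
            split_ifs <;> simp
          have hl2 : (if i + 2 < (mask i n).length then [i + 2] else []).length ≤ 1 := by
            split_ifs <;> simp
          apply ih (i + 1)
            ((rest ++ (if i + 1 < (mask i n).length then [i + 1] else []))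
              ++ (if i + 2 < (mask i n).length then [i + 2] else []))
            (by simp only [List.length_append, List.length_cons] at hf ⊢; omega) hkn
          · intro j hj
            simp only [List.mem_append] at hj
            rcases hj with (hj | hj) | hj
            · have := hle j (List.mem_cons_of_mem i hj); omega
            · split_ifs at hj
              · simp at hj; omega
              · simp at hj
            · split_ifs at hj
              · simp at hj; omega
              · simp at hj
          · intro h2
            rw [show (if i + 1 < (mask i n).length then [i + 1] else []) = [i + 1] by
              rw [mask_length, if_pos h2]]
            obtain ⟨q1', q2', heq', hq1'⟩ :=
              split_first (i + 1) rest (fun j hj => hle j (List.mem_cons_of_mem i hj))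
                (if i + 2 < (mask i n).length then [i + 2] else [])
            exact ⟨q1', q2', by simpa [List.append_assoc] using heq',
              fun j hj => Or.inl (hq1' j hj)⟩
        · -- head is a stale element (already visited or out of range): skipped
          simp only [List.cons_append] at heq
          injection heq with h1 h2
          subst h1
          have ha : i < k ∨ n ≤ i := hq1 i (by simp)
          rw [bfsLoop, dif_pos (by
            rcases ha with ha | ha
            · exact Or.inr (mask_getD_lt k n i ha (by omega))
            · exact Or.inl (by rw [mask_length]; exact ha))]
          apply ih k rest (by simp at hf ⊢; omega) hk
            (fun j hj => hle j (List.mem_cons_of_mem i hj))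
          intro _
          exact ⟨q1', q2, h2, fun j hj => hq1 j (List.mem_cons_of_mem i hj)⟩
      · -- k = n: everything left in the queue is visited or out of range; drain it
        have hkn' : k = n := by omega
        rw [bfsLoop, dif_pos (by
          by_cases hin : i < n
          · exact Or.inr (mask_getD_lt k n i (by omega) hin)
          · exact Or.inl (by rw [mask_length]; omega))]
        apply ih k rest (by simp at hf ⊢; omega) hk
          (fun j hj => hle j (List.mem_cons_of_mem i hj)) (by omega)

theorem A_eq_spec (n : Nat) : bfsLoop [0] (List.replicate n false) = spec n 0 := by
  rw [← mask_zero]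
  apply bfsLoop_inv n (2 * n + 1) 0 [0] (by simp) (Nat.zero_le n) (by simp)
  intro h
  exact ⟨[], [], rfl, by simp⟩

-- B-side: the closed-form snapshot is mask (i+1) n, and the map over range is spec n 0.
theorem snapshot_eq_mask (n i : Nat) (h : i < n) :
    List.replicate (i + 1) true ++ List.replicate (n - i - 1) false = mask (i + 1) n := by
  apply List.ext_getElem
  · simp [mask_length]; omega
  · intro j h1 h2
    have hj : j < n := by simpa [mask_length] using h2
    rw [mask_getElem (i + 1) n j hj]
    by_cases hji : j < i + 1
    · rw [List.getElem_append_left (by simpa using hji)]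
      simp [hji]
    · rw [List.getElem_append_right (by simpa using hji)]
      simp only [List.getElem_replicate]
      simp; omega

theorem B_eq_spec (n : Nat) : ∀ k, spec n k =
    (List.range' k (n - k)).map (fun (i : Nat) => ([(i : Int)],
      List.replicate (i + 1) true ++ List.replicate (n - i - 1) false)) := by
  intro k
  induction hfuel : n - k generalizing k with
  | zero => rw [spec, dif_neg (by omega)]; simp
  | succ m ih =>
    have hkn : k < n := by omega
    rw [spec, dif_pos hkn, List.range'_succ, List.map_cons,
      snapshot_eq_mask n k hkn, ih (k + 1) (by omega)]

-- ===== VERDICT (by name: the statement is the Claim_ definition above) =====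
theorem generate_bfs_steps_spec : Claim_equal_generate_bfs_steps := by
  intro arr _
  unfold Spec_generate_bfs_steps generate_bfs_steps generate_bfs_steps_alt
  rw [A_eq_spec, B_eq_spec arr.length 0]
  simp [List.range_eq_range']
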